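-- pv_equiv track=rewrite | github.com/JohnSnowLabs/nlu | nlu/pipe/viz/streamlit_viz/streamlit_viz_tracker.py | pad_duplicate_tokens
-- ===== SOURCE A (Python) =====
-- def pad_duplicate_tokens(tokens):
--     """For every duplicate token in input list, ads N whitespaces for the Nth duplicate"""
--     duplicates = {}
--
--     for i,s in enumerate(tokens) :
--         if s in duplicates.keys():duplicates[s].append(i)
--         else :                    duplicates[s]=[i]
--     for i, d in enumerate(duplicates.items()):
--         for i,idx in enumerate(d[1]):tokens[idx]=d[0]+' '*i
--     return tokens
-- ===== SOURCE B (Python) =====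
-- def pad_duplicate_tokens(tokens):
--     """Single streaming pass: running per-token counts instead of precomputing
--     index lists and a nested rewrite pass. (A mutates `tokens` in place; B builds
--     a fresh list — return values agree.)"""
--     seen = {}
--     out = []
--     for s in tokens:
--         c = seen.get(s, 0)
--         out.append(s + ' ' * c)
--         seen[s] = c + 1
--     return out
-- ===== Notes on version B (the rewrite author's own statement) =====
-- stated objective: simpler
-- what changed: Replaced the two-phase build-an-index-table-then-nested-rewrite (group all occurrence indices per token, then for each group write token+N spaces back at each stored index) by a single streaming pass that keeps a running count per token and emits each padded token immediately.
import Mathlib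
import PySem

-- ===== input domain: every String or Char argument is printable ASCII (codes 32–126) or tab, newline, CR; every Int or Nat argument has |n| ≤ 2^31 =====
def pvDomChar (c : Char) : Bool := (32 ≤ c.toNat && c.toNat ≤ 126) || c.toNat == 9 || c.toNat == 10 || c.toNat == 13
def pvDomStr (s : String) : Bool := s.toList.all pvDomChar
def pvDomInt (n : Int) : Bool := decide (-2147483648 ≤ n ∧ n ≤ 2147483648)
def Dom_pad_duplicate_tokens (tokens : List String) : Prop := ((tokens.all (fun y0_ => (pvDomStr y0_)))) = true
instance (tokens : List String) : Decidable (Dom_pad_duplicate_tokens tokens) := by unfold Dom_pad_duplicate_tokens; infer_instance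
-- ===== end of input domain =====

-- B replaces A's two-phase group-indices-then-rewrite by one streaming pass with running
-- per-token counts (simpler); A mutates its argument in place, B builds a fresh list —
-- the equivalence proved here is about the RETURN value only.


-- ===== PORT A =====
def pad_duplicate_tokens (tokens : List String) : List String :=
  let duplicates : PySem.Dict String (List Int) :=
    (PySem.List.enumerate tokens).foldl
      (fun d p =>
        if d.contains p.2 then d.modify p.2 [] (fun l => l ++ [p.1])
        else d.insert p.2 [p.1])
      PySem.Dict.empty
  (PySem.List.enumerate duplicates.items).foldl
    (fun toks q =>
      (PySem.List.enumerate q.2.2).foldl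
        (fun toks r => PySem.List.pySetD toks r.2 (q.2.1 ++ String.ofList (List.replicate r.1.toNat ' ')))
        toks)
    tokens

-- ===== PORT B =====
def pad_duplicate_tokens_alt (tokens : List String) : List String :=
  (tokens.foldl
    (fun (st : PySem.Dict String Int × List String) s =>
      let c := st.1.getD s 0
      (st.1.insert s (c + 1), st.2 ++ [s ++ String.ofList (List.replicate c.toNat ' ')]))
    (PySem.Dict.empty, [])).2

-- ===== PRECONDITION & SPEC =====
def Spec_pad_duplicate_tokens (tokens : List String) (out : List String) : Prop := out = pad_duplicate_tokens_alt tokens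
instance (tokens : List String) (out : List String) : Decidable (Spec_pad_duplicate_tokens tokens out) := by unfold Spec_pad_duplicate_tokens; infer_instance

-- ===== CLAIM (what is proved, stated in full; the proofs are below) =====
def Claim_equal_pad_duplicate_tokens : Prop := ∀ (tokens : List String), Dom_pad_duplicate_tokens tokens → Spec_pad_duplicate_tokens tokens (pad_duplicate_tokens tokens)

-- ===== LEMMAS AND PROOFS =====

-- token ++ c spaces, the value both programs store
def pvPad (s : String) (c : Nat) : String := s ++ String.ofList (List.replicate c ' ')

-- common specification: j-th output = tokens[j] padded by the number of earlier equal tokens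
def pvSpecGo (pre : List String) : List String → List String
  | [] => []
  | s :: l => pvPad s (pre.count s) :: pvSpecGo (pre ++ [s]) l

theorem pvSpecGo_length (l pre : List String) : (pvSpecGo pre l).length = l.length := by
  induction l generalizing pre with
  | nil => rfl
  | cons s l ih => simp [pvSpecGo, ih]

theorem pvSpecGo_getElem? (l : List String) (pre : List String) (j : Nat) (hj : j < l.length) :
    (pvSpecGo pre l)[j]? = some (pvPad (l.getD j "") ((pre ++ l.take j).count (l.getD j ""))) := by
  induction l generalizing pre j with
  | nil => simp at hj
  | cons s l ih =>
    cases j with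
    | zero => simp [pvSpecGo]
    | succ j =>
      simp only [pvSpecGo, List.getElem?_cons_succ, List.getD_cons_succ, List.take_succ_cons]
      rw [ih _ _ (by simpa using hj)]
      simp [List.append_assoc]

-- ===== B equals the specification =====
theorem pvB_inv (l pre : List String) (d : PySem.Dict String Int) (acc : List String)
    (hd : ∀ s : String, d.getD s 0 = (pre.count s : Int)) :
    (l.foldl
      (fun (st : PySem.Dict String Int × List String) s =>
        let c := st.1.getD s 0
        (st.1.insert s (c + 1), st.2 ++ [s ++ String.ofList (List.replicate c.toNat ' ')]))
      (d, acc)).2 = acc ++ pvSpecGo pre l := by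
  induction l generalizing pre d acc with
  | nil => simp [pvSpecGo]
  | cons s l ih =>
    simp only [List.foldl_cons]
    rw [ih (pre ++ [s]) _ _ ?_]
    · simp [pvSpecGo, pvPad, hd s]
    · intro t
      rw [PySem.Dict.getD_insert]
      by_cases h : t = s
      · subst h; simp [hd t, List.count_append]
      · simp [h, hd t, List.count_append, Ne.symm h]

theorem pvB_eq_spec (tokens : List String) :
    pad_duplicate_tokens_alt tokens = pvSpecGo [] tokens := by
  unfold pad_duplicate_tokens_alt
  rw [pvB_inv tokens [] _ _ (by intro s; simp)]
  simp

-- ===== A equals the specification =====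
-- indices (as produced by enumerate) at which token s occurs
def pvIdxs (s : String) (tokens : List String) : List Int :=
  (((PySem.List.enumerate tokens).filter (fun p => p.2 == s)).map (·.1))

theorem pv_modify_eq_insert (d : PySem.Dict String (List Int)) (k : String) (i : Int) :
    d.modify k [] (fun l => l ++ [i]) = d.insert k (d.getD k [] ++ [i]) :=
  PySem.Dict.ext_iff.mpr rfl

theorem pvA_dict_step (d : PySem.Dict String (List Int)) (p : Int × String) :
    (if d.contains p.2 then d.modify p.2 [] (fun l => l ++ [p.1]) else d.insert p.2 [p.1]) =
      d.modify p.2 [] (fun l => l ++ [p.1]) := by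
  by_cases h : d.contains p.2 = true
  · simp [h]
  · simp only [Bool.not_eq_true] at h
    rw [if_neg (by simp [h]), pv_modify_eq_insert, PySem.Dict.getD_of_not_contains _ _ h]
    simp

-- the dict A builds, with the step function normalised to modify
def pvDups (tokens : List String) : PySem.Dict String (List Int) :=
  (PySem.List.enumerate tokens).foldl
    (fun d p => d.modify p.2 [] (fun l => l ++ [p.1])) PySem.Dict.empty

theorem pvDups_getD (tokens : List String) (s : String) :
    (pvDups tokens).getD s [] = pvIdxs s tokens := by
  unfold pvDups pvIdxs
  have h := PySem.Dict.getD_foldl_modify_append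
    (l := (PySem.List.enumerate tokens).map (fun p => (p.2, p.1)))
    (d := (PySem.Dict.empty : PySem.Dict String (List Int))) (c := s)
  rw [List.foldl_map] at h
  simp only [h, PySem.Dict.getD_empty, List.nil_append, List.filter_map, List.map_map]
  rfl

theorem pvDups_keys (tokens : List String) : (pvDups tokens).keys = PySem.Set.ofList tokens := by
  unfold pvDups
  rw [PySem.Dict.keys_foldl_modify_key (key := fun p : Int × String => p.2)]
  simp [PySem.List.map_snd_enumerate, PySem.Set.ofList_eq_foldl, PySem.Set.update]

theorem pvDups_nodup (tokens : List String) : (pvDups tokens).keys.Nodup := by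
  unfold pvDups
  exact PySem.Dict.nodup_keys_foldl_modify_key _ _ _ _ _ PySem.Dict.nodup_keys_empty

theorem pvDups_items (tokens : List String) :
    (pvDups tokens).items = (PySem.Set.ofList tokens).map (fun s => (s, pvIdxs s tokens)) := by
  have hk : (pvDups tokens).items.map (·.1) = PySem.Set.ofList tokens := pvDups_keys tokens
  calc (pvDups tokens).items
      = (pvDups tokens).items.map (fun p => (p.1, pvIdxs p.1 tokens)) := by
        conv_lhs => rw [← List.map_id ((pvDups tokens).items)]
        apply List.map_congr_left
        intro p hp
        obtain ⟨k, v⟩ := p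
        have h2 : (pvDups tokens).getD k [] = v :=
          PySem.Dict.getD_of_mem_items _ hp (pvDups_nodup tokens) []
        rw [id_eq, ← pvDups_getD tokens k, h2]
    _ = ((pvDups tokens).items.map (·.1)).map (fun s => (s, pvIdxs s tokens)) := by
        rw [List.map_map]; rfl
    _ = (PySem.Set.ofList tokens).map (fun s => (s, pvIdxs s tokens)) := by rw [hk]

-- rank: position of index (s0+k) inside the filtered-enumerate index list = number of earlier occurrences
theorem pvRank : ∀ (tokens : List String) (s0 : Int) (s : String) (k : Nat), k < tokens.length →
    (tokens.getD k "" = s →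
      PySem.List.index? ((((PySem.List.enumerate tokens s0).filter (fun p => p.2 == s)).map (·.1)))
        (s0 + k) = some ((tokens.take k).count s))
    ∧ (tokens.getD k "" ≠ s →
      (s0 + (k : Int)) ∉ (((PySem.List.enumerate tokens s0).filter (fun p => p.2 == s)).map (·.1)))
  | [], s0, s, k => by intro hk; simp at hk
  | x :: tokens, s0, s, k => by
    intro hk
    have hbound : ∀ q ∈ (((PySem.List.enumerate tokens (s0+1)).filter (fun p => p.2 == s)).map (·.1)), s0 + 1 ≤ q := by
      intro q hq
      simp only [List.mem_map, List.mem_filter] at hq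
      obtain ⟨p, ⟨hp, _⟩, rfl⟩ := hq
      rw [PySem.List.mem_enumerate_iff] at hp
      obtain ⟨k', _, rfl⟩ := hp
      simp
    rw [PySem.List.enumerate_cons]
    cases k with
    | zero =>
      constructor
      · intro hx
        have hx' : x = s := by simpa using hx
        rw [List.filter_cons, if_pos (by simp [hx']), List.map_cons, List.take_zero]
        have h0 : s0 + ((0 : Nat) : Int) = s0 := by simp
        rw [h0, hx']
        exact PySem.List.index?_cons_self _ _
      · intro hx
        have hx' : x ≠ s := by simpa using hx
        rw [List.filter_cons, if_neg (by simp [hx'])]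
        intro hmem
        have := hbound _ hmem
        omega
    | succ k =>
      have ih := pvRank tokens (s0 + 1) s k (by simpa using hk)
      have hxk : (x :: tokens).getD (k+1) "" = tokens.getD k "" := by simp
      have harr : s0 + ((k + 1 : Nat) : Int) = s0 + 1 + (k : Int) := by push_cast; ring
      constructor
      · intro hx
        rw [hxk] at hx
        have h1 := ih.1 hx
        rw [List.filter_cons]
        by_cases hxs : x = s
        · rw [if_pos (by simp [hxs]), List.map_cons]
          rw [PySem.List.index?_cons_of_ne _ (by intro h; omega)]
          rw [harr, h1]
          simp [hxs]
        · rw [if_neg (by simp [hxs]), harr, h1]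
          simp [hxs]
      · intro hx
        rw [hxk] at hx
        have h2 := ih.2 hx
        rw [List.filter_cons]
        by_cases hxs : x = s
        · rw [if_pos (by simp [hxs]), List.map_cons]
          intro hmem
          rcases List.mem_cons.mp hmem with h | h
          · simp only [] at h; omega
          · rw [harr] at h; exact h2 h
        · rw [if_neg (by simp [hxs])]
          intro hmem
          rw [harr] at hmem
          exact h2 hmem

-- inner write loop, pointwise
theorem pvWrite (f : Int → String) : ∀ (idxs : List Int) (cur : List String) (k0 : Int),
    (∀ i ∈ idxs, 0 ≤ i ∧ i < (cur.length : Int)) → idxs.Nodup →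
    ((PySem.List.enumerate idxs k0).foldl
        (fun toks r => PySem.List.pySetD toks r.2 (f r.1)) cur).length = cur.length
    ∧ ∀ (j : Nat), j < cur.length →
      ((PySem.List.enumerate idxs k0).foldl
        (fun toks r => PySem.List.pySetD toks r.2 (f r.1)) cur)[j]? =
      match PySem.List.index? idxs (j : Int) with
      | some k => some (f (k0 + k))
      | none => cur[j]?
  | [] => by
    intro cur k0 _ _
    constructor
    · rfl
    · intro j hj
      have : PySem.List.index? ([] : List Int) (j : Int) = none := by
        exact (PySem.List.index?_eq_none_iff _ _).mpr (by simp)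
      rw [this]
      rfl
  | i :: idxs => by
    intro cur k0 hr hnd
    have hi := hr i (List.mem_cons_self)
    have hset : PySem.List.pySetD cur i (f k0) = cur.set i.toNat (f k0) :=
      PySem.List.pySetD_of_nonneg cur (f k0) hi.1
    have hlen' : (PySem.List.pySetD cur i (f k0)).length = cur.length := by
      rw [hset, List.length_set]
    have hr' : ∀ x ∈ idxs, 0 ≤ x ∧ x < ((PySem.List.pySetD cur i (f k0)).length : Int) := by
      intro x hx; rw [hlen']; exact hr x (List.mem_cons_of_mem _ hx)
    obtain ⟨ihlen, ihget⟩ := pvWrite f idxs (PySem.List.pySetD cur i (f k0)) (k0 + 1) hr' hnd.of_cons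
    rw [PySem.List.enumerate_cons]
    simp only [List.foldl_cons]
    refine ⟨ihlen.trans hlen', ?_⟩
    intro j hj
    have hinot : i ∉ idxs := (List.nodup_cons.mp hnd).1
    by_cases hij : (j : Int) = i
    · have h1 : PySem.List.index? (i :: idxs) (j : Int) = some 0 := by
        rw [hij]; exact PySem.List.index?_cons_self _ _
      have h2 : PySem.List.index? idxs (j : Int) = none := by
        rw [hij]; exact (PySem.List.index?_eq_none_iff _ _).mpr hinot
      rw [h1, ihget j (by omega)]
      rw [h2, hset]
      have : i.toNat = j := by omega
      rw [this, List.getElem?_set_of_lt' _ _ hj, if_pos rfl]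
      simp
    · have h1 : PySem.List.index? (i :: idxs) (j : Int) = (PySem.List.index? idxs (j:Int)).map (· + 1) :=
        PySem.List.index?_cons_of_ne _ (fun h => hij (h.symm))
      rw [h1, ihget j (by omega)]
      have hcur' : (PySem.List.pySetD cur i (f k0))[j]? = cur[j]? := by
        rw [hset, List.getElem?_set_of_lt' _ _ (by omega), if_neg (by omega)]
      cases h : PySem.List.index? idxs (j : Int) with
      | none => simp [hcur']
      | some k =>
        simp only [Option.map_some]
        have : k0 + 1 + (k : Int) = k0 + ((k : Nat) + 1 : Nat) := by push_cast; ring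
        rw [this]

-- fold over enumerate ignoring the counter
theorem pvFoldl_enumerate {α β : Type} (g : β → α → β) :
    ∀ (l : List α) (s0 : Int) (b : β),
    (PySem.List.enumerate l s0).foldl (fun b p => g b p.2) b = l.foldl g b := by
  intro l
  induction l with
  | nil => intro s0 b; rfl
  | cons x l ih => intro s0 b; rw [PySem.List.enumerate_cons]; simp only [List.foldl_cons, ih]

-- index lists are strictly increasing hence nodup, and in range
theorem pvIdxs_nodup (s : String) (tokens : List String) : (pvIdxs s tokens).Nodup := by
  have h := (PySem.List.pairwise_lt_enumerate tokens 0).filter (fun p => p.2 == s)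
  have h2 : ((((PySem.List.enumerate tokens 0).filter (fun p => p.2 == s)).map (·.1)) : List Int).Pairwise (· < ·) :=
    List.pairwise_map.mpr h
  exact h2.imp (fun hlt => ne_of_lt hlt)

theorem pvIdxs_range (s : String) (tokens : List String) :
    ∀ i ∈ pvIdxs s tokens, 0 ≤ i ∧ i < (tokens.length : Int) := by
  intro i hi
  simp only [pvIdxs, List.mem_map, List.mem_filter] at hi
  obtain ⟨p, ⟨hp, _⟩, rfl⟩ := hi
  rw [PySem.List.mem_enumerate_iff] at hp
  obtain ⟨k', hk', rfl⟩ := hp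
  simp
  omega

-- outer loop invariant
theorem pvOuter (tokens : List String) : ∀ (S : List String) (cur : List String),
    cur.length = tokens.length →
    ((S.foldl (fun toks s =>
        (PySem.List.enumerate (pvIdxs s tokens)).foldl
          (fun toks r => PySem.List.pySetD toks r.2 (s ++ String.ofList (List.replicate r.1.toNat ' ')))
          toks) cur).length = tokens.length
    ∧ ∀ (j : Nat), j < tokens.length →
      (S.foldl (fun toks s =>
        (PySem.List.enumerate (pvIdxs s tokens)).foldl
          (fun toks r => PySem.List.pySetD toks r.2 (s ++ String.ofList (List.replicate r.1.toNat ' ')))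
          toks) cur)[j]? =
      if tokens.getD j "" ∈ S
      then some (pvPad (tokens.getD j "") ((tokens.take j).count (tokens.getD j "")))
      else cur[j]?)
  | [] => by
    intro cur hlen
    refine ⟨hlen, ?_⟩
    intro j hj
    simp
  | s :: S => by
    intro cur hlen
    simp only [List.foldl_cons]
    obtain ⟨wlen, wget⟩ := pvWrite (fun x => s ++ String.ofList (List.replicate x.toNat ' '))
      (pvIdxs s tokens) cur 0 (by rw [hlen]; exact pvIdxs_range s tokens) (pvIdxs_nodup s tokens)
    obtain ⟨ihlen, ihget⟩ := pvOuter tokens S _ (wlen.trans hlen)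
    refine ⟨ihlen, ?_⟩
    intro j hj
    rw [ihget j hj]
    by_cases hmem : tokens.getD j "" ∈ S
    · rw [if_pos hmem, if_pos (List.mem_cons_of_mem _ hmem)]
    · rw [if_neg hmem, wget j (by omega)]
      by_cases hts : tokens.getD j "" = s
      · rw [if_pos (by rw [hts]; exact List.mem_cons_self)]
        have h1 := (pvRank tokens 0 s j hj).1 hts
        rw [zero_add] at h1
        rw [pvIdxs, h1, hts]
        simp [pvPad]
      · rw [if_neg (fun h => (List.mem_cons.mp h).elim hts hmem)]
        have h2 := (pvRank tokens 0 s j hj).2 hts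
        rw [zero_add] at h2
        have : PySem.List.index? (pvIdxs s tokens) (j : Int) = none :=
          (PySem.List.index?_eq_none_iff _ _).mpr h2
        rw [this]

theorem pvA_eq_spec (tokens : List String) :
    pad_duplicate_tokens tokens = pvSpecGo [] tokens := by
  have h1 : pad_duplicate_tokens tokens =
      (PySem.Set.ofList tokens).foldl (fun toks s =>
        (PySem.List.enumerate (pvIdxs s tokens)).foldl
          (fun toks r => PySem.List.pySetD toks r.2 (s ++ String.ofList (List.replicate r.1.toNat ' ')))
          toks) tokens := by
    unfold pad_duplicate_tokens
    simp only [pvA_dict_step]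
    rw [show ((PySem.List.enumerate tokens).foldl
        (fun d (p : Int × String) => d.modify p.2 [] (fun l => l ++ [p.1])) PySem.Dict.empty) = pvDups tokens from rfl]
    rw [pvDups_items]
    rw [pvFoldl_enumerate (fun toks (dd : String × List Int) =>
      (PySem.List.enumerate dd.2).foldl
        (fun toks r => PySem.List.pySetD toks r.2 (dd.1 ++ String.ofList (List.replicate r.1.toNat ' '))) toks)]
    rw [List.foldl_map]
  obtain ⟨hlen, hget⟩ := pvOuter tokens (PySem.Set.ofList tokens) tokens rfl
  rw [h1]
  apply List.ext_getElem?
  intro j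
  by_cases hj : j < tokens.length
  · rw [hget j hj, pvSpecGo_getElem? tokens [] j hj, List.nil_append]
    rw [if_pos ]
    rw [PySem.Set.mem_ofList, List.getD_eq_getElem tokens "" hj]
    exact List.getElem_mem hj
  · rw [List.getElem?_eq_none (by omega), List.getElem?_eq_none (by rw [pvSpecGo_length]; omega)]

-- ===== VERDICT (by name: the statement is the Claim_ definition above) =====
theorem pad_duplicate_tokens_spec : Claim_equal_pad_duplicate_tokens := by
  intro tokens _
  unfold Spec_pad_duplicate_tokens
  rw [pvB_eq_spec, pvA_eq_spec]
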